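-- pv_equiv track=rewrite | github.com/A4unecabrat/HackBulgaria101 | week0/week0-day1.py | sevens_in_a_row
-- ===== SOURCE A (Python) =====
-- def sevens_in_a_row(arr, n):
--     count = 0
--     while count != n:
--         if arr == []:
--             return False
--         elif arr[0] == 7:
--             count += 1
--         elif count > 0:
--             count -= 1
--         arr.remove(arr[0])
--     return True
-- ===== SOURCE B (Python) =====
-- def sevens_in_a_row(arr, n):
--     # The counter of A starts at 0 and moves by +1, -1 or 0 each step, never
--     # going below 0, so the set of values it ever reaches is exactly the
--     # integer interval [0, m] where m is the maximum prefix count.  A returns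
--     # True iff n lies in that interval.
--     count = 0
--     m = 0
--     for x in arr:
--         if x == 7:
--             count += 1
--             if count > m:
--                 m = count
--         elif count > 0:
--             count -= 1
--     return 0 <= n <= m
-- ===== Notes on version B (the rewrite author's own statement) =====
-- stated objective: faster
-- what changed: Replaces A's destructive while-loop (arr.remove(arr[0]) each iteration, comparing count with n each step) by one non-mutating pass that only tracks the maximum prefix count m and returns 0 <= n <= m, using the fact that the +-1-step counter visits exactly the interval [0, m].
import Mathlib
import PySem

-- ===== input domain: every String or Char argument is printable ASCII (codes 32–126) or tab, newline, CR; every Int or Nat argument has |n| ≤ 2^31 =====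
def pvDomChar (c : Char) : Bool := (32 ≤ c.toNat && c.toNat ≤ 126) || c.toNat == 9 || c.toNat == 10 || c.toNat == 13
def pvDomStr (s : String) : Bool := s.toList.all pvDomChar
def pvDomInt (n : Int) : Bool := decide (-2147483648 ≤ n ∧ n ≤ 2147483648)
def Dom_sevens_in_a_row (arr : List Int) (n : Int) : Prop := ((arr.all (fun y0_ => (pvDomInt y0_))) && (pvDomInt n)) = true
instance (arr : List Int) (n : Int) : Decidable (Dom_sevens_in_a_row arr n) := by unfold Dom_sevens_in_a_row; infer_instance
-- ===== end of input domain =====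

-- B replaces A's O(n^2) destructive while-loop by one O(n) pass that tracks only the maximum
-- prefix count and tests 0 <= n <= max at the end; A empties its argument list in place, B does
-- not mutate — the equivalence proved here is about the return value.

-- ===== PORT A =====
-- A's while-loop: test count != n first; if the list is empty return False; update count from
-- the head; arr.remove(arr[0]) deletes the first occurrence of the head, i.e. the head itself,
-- so the loop recurses on the tail.
def pvA_loop : List Int → Int → Int → Bool
  | arr, count, n =>
    if count = n then true
    else
      match arr with
      | [] => false
      | x :: rest =>
        let count' := if x = 7 then count + 1 else if count > 0 then count - 1 else count
        pvA_loop rest count' n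

def sevens_in_a_row (arr : List Int) (n : Int) : Bool := pvA_loop arr 0 n

-- ===== PORT B =====
-- B's for-loop: carry (count, m) through the list, m = running maximum of count; at the end
-- answer 0 <= n <= m.
def pvB_scan : List Int → Int → Int → Int × Int
  | [], count, m => (count, m)
  | x :: rest, count, m =>
    if x = 7 then pvB_scan rest (count + 1) (if count + 1 > m then count + 1 else m)
    else if count > 0 then pvB_scan rest (count - 1) m
    else pvB_scan rest count m

def sevens_in_a_row_alt (arr : List Int) (n : Int) : Bool :=
  decide (0 ≤ n ∧ n ≤ (pvB_scan arr 0 0).2)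

-- ===== PRECONDITION & SPEC =====
def Spec_sevens_in_a_row (arr : List Int) (n : Int) (out : Bool) : Prop := out = sevens_in_a_row_alt arr n
instance (arr : List Int) (n : Int) (out : Bool) : Decidable (Spec_sevens_in_a_row arr n out) := by unfold Spec_sevens_in_a_row; infer_instance

-- ===== CLAIM (what is proved, stated in full; the proofs are below) =====
def Claim_equal_sevens_in_a_row : Prop := ∀ (arr : List Int) (n : Int), Dom_sevens_in_a_row arr n → Spec_sevens_in_a_row arr n (sevens_in_a_row arr n)

-- ===== LEMMAS AND PROOFS =====

-- Proof-side helper: the min and max of the counter trajectory of A starting at c.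
def pvTraj : List Int → Int → Int × Int
  | [], c => (c, c)
  | x :: rest, c =>
    let c' := if x = 7 then c + 1 else if c > 0 then c - 1 else c
    let p := pvTraj rest c'
    (min c p.1, max c p.2)

theorem pvTraj_bounds (arr : List Int) (c : Int) :
    (pvTraj arr c).1 ≤ c ∧ c ≤ (pvTraj arr c).2 := by
  cases arr with
  | nil => simp [pvTraj]
  | cons x rest => simp [pvTraj]

theorem pvTraj_fst_nonneg (arr : List Int) : ∀ c : Int, 0 ≤ c → 0 ≤ (pvTraj arr c).1 := by
  induction arr with
  | nil => intro c hc; simpa [pvTraj] using hc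
  | cons x rest ih =>
    intro c hc
    simp only [pvTraj]
    have h' : 0 ≤ (pvTraj rest (if x = 7 then c + 1 else if c > 0 then c - 1 else c)).1 := by
      apply ih; split_ifs <;> omega
    simp only [le_min_iff]
    exact ⟨hc, h'⟩

-- A returns true iff n lies in the trajectory interval (the counter moves by at most 1 a step,
-- so it visits every value between its min and its max).
theorem pvA_loop_eq_interval (arr : List Int) (n : Int) :
    ∀ c : Int, pvA_loop arr c n = decide ((pvTraj arr c).1 ≤ n ∧ n ≤ (pvTraj arr c).2) := by
  induction arr with
  | nil =>
    intro c
    simp only [pvA_loop, pvTraj]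
    by_cases h : c = n <;> simp [h] <;> omega
  | cons x rest ih =>
    intro c
    set c' := if x = 7 then c + 1 else if c > 0 then c - 1 else c with hc'
    have hstep : c - 1 ≤ c' ∧ c' ≤ c + 1 := by rw [hc']; split_ifs <;> omega
    have hb := pvTraj_bounds rest c'
    simp only [pvA_loop, pvTraj, ← hc', ih]
    by_cases h : c = n
    · simp only [if_pos h, eq_comm (a := true), decide_eq_true_iff]
      omega
    · simp only [if_neg h, decide_eq_decide]
      omega

-- B's running maximum equals the trajectory maximum (as long as m ≥ c on entry).
theorem pvB_scan_snd (arr : List Int) : ∀ c m : Int, c ≤ m →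
    (pvB_scan arr c m).2 = max m (pvTraj arr c).2 := by
  induction arr with
  | nil => intro c m h; simp [pvB_scan, pvTraj]; omega
  | cons x rest ih =>
    intro c m h
    by_cases h7 : x = 7
    · have hb := pvTraj_bounds rest (c + 1)
      simp only [pvB_scan, pvTraj, if_pos h7]
      rw [ih (c + 1) (if c + 1 > m then c + 1 else m) (by split_ifs <;> omega)]
      split_ifs <;> omega
    · by_cases hpos : c > 0
      · have hb := pvTraj_bounds rest (c - 1)
        simp only [pvB_scan, pvTraj, if_neg h7, if_pos hpos]
        rw [ih (c - 1) m (by omega)]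
        omega
      · have hb := pvTraj_bounds rest c
        simp only [pvB_scan, pvTraj, if_neg h7, if_neg hpos]
        rw [ih c m h]
        omega

-- ===== VERDICT (by name: the statement is the Claim_ definition above) =====
theorem sevens_in_a_row_spec : Claim_equal_sevens_in_a_row := by
  intro arr n _
  unfold Spec_sevens_in_a_row sevens_in_a_row sevens_in_a_row_alt
  rw [pvA_loop_eq_interval, pvB_scan_snd arr 0 0 le_rfl, decide_eq_decide]
  have h1 := pvTraj_bounds arr 0
  have h2 := pvTraj_fst_nonneg arr 0 le_rfl
  omega
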